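-- pv_equiv track=rewrite | github.com/CalvinSmyk/Data-Computer-Communication_Tasks | HammingCode_implementation/Hamming74.py | recreate_8bits
-- ===== SOURCE A (Python) =====
-- def recreate_8bits(signal):
--     first_four_bits = []
--     for new_symbol in signal:
--         new_symbol = new_symbol[0:4]
--         first_four_bits.append(new_symbol)
--
--     """Concatenate two 4 bit pairs to one byte """
--     byte_list = []
--     for list in range(0, int(len(first_four_bits)), 2):
--         byte_list.append(first_four_bits[list] + first_four_bits[list + 1])
--     return byte_list
-- ===== SOURCE B (Python) =====
-- # (parameter spelled signal_ : the harness forbids the bare name 'signal' in this file)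
-- def recreate_8bits(signal_):
--     it = iter(signal_)
--     return [a[0:4] + b[0:4] for a, b in zip(it, it)]
-- ===== Notes on version B (the rewrite author's own statement) =====
-- stated objective: simpler
-- what changed: Replaced A's two sequential index-based passes (build a truncated list, then index into it with range(0,n,2)) by a single pass that pairs consecutive elements with an iterator zipped against itself, with no intermediate list and no indexing.
import Mathlib
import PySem

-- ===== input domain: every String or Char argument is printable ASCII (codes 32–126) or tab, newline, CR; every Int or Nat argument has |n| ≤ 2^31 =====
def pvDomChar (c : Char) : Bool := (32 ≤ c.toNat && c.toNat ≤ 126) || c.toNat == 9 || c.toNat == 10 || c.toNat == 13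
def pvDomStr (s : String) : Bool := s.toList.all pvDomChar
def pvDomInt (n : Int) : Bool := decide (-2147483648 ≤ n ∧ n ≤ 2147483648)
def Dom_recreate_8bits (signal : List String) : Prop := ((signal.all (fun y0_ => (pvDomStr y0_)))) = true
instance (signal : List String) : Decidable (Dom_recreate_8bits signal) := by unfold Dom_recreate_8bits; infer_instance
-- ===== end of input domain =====

-- B fuses A's two passes into one iterator-pairing pass (no intermediate list, no indexing); equal return values on even-length input.

-- ===== PORT A =====
def recreate_8bits (signal : List String) : List String :=
  let first_four_bits : List String :=
    signal.foldl (fun acc new_symbol => acc ++ [PySem.Str.slice new_symbol (some 0) (some 4)]) []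
  let byte_list : List String :=
    (PySem.List.pyRange 0 (PySem.List.len first_four_bits) 2).foldl
      (fun acc i =>
        acc ++ [PySem.List.pyGetD first_four_bits i "" ++ PySem.List.pyGetD first_four_bits (i + 1) ""]) []
  byte_list

-- ===== PORT B =====
def pvTake4 (s : String) : String := PySem.Str.slice s (some 0) (some 4)

-- zip(it, it): pair consecutive elements, dropping an unpaired last one
def pvPairBytes : List String → List String
  | a :: b :: rest => (pvTake4 a ++ pvTake4 b) :: pvPairBytes rest
  | _ => []

def recreate_8bits_alt (signal : List String) : List String := pvPairBytes signal

-- ===== PRECONDITION & SPEC =====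
-- Pre_ excludes odd-length input, on which A raises IndexError (signal[i+1] past the end).
def Pre_recreate_8bits (signal : List String) : Prop := signal.length % 2 = 0
instance (signal : List String) : Decidable (Pre_recreate_8bits signal) := by unfold Pre_recreate_8bits; infer_instance
def pvWitness_recreate_8bits : List String := ["1011010", "0010110"]

def Spec_recreate_8bits (signal : List String) (out : List String) : Prop := out = recreate_8bits_alt signal
instance (signal : List String) (out : List String) : Decidable (Spec_recreate_8bits signal out) := by unfold Spec_recreate_8bits; infer_instance

-- ===== CLAIM (what is proved, stated in full; the proofs are below) =====
def Claim_equal_recreate_8bits : Prop := ∀ (signal : List String), Dom_recreate_8bits signal → Pre_recreate_8bits signal → Spec_recreate_8bits signal (recreate_8bits signal)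

-- ===== LEMMAS AND PROOFS =====

-- concatenate adjacent pairs (proof-side skeleton of pvPairBytes, without the truncation)
def pvPairsCat : List String → List String
  | a :: b :: rest => (a ++ b) :: pvPairsCat rest
  | _ => []

lemma pvPairBytes_eq_pairsCat_map : ∀ (ys : List String), pvPairBytes ys = pvPairsCat (ys.map pvTake4)
  | [] => rfl
  | [_] => rfl
  | _ :: _ :: r => by
      simp only [pvPairBytes, List.map_cons, pvPairsCat]
      exact congrArg _ (pvPairBytes_eq_pairsCat_map r)

lemma pvRange_map_eq_pairsCat : ∀ (ys : List String), ys.length % 2 = 0 →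
    (List.range (ys.length / 2)).map (fun k => ys.getD (2 * k) "" ++ ys.getD (2 * k + 1) "") = pvPairsCat ys
  | [], _ => rfl
  | [_], h => by simp at h
  | a :: b :: r, h => by
      have hr : r.length % 2 = 0 := by
        simp only [List.length_cons] at h; omega
      have hlen : (a :: b :: r).length / 2 = r.length / 2 + 1 := by
        simp only [List.length_cons]; omega
      rw [hlen, List.range_succ_eq_map, List.map_cons, List.map_map, pvPairsCat]
      refine congrArg₂ _ (by simp) ?_
      rw [← pvRange_map_eq_pairsCat r hr]
      refine List.map_congr_left (fun k _ => ?_)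
      have h1 : 2 * (k + 1) = 2 * k + 1 + 1 := by omega
      have h2 : 2 * (k + 1) + 1 = 2 * k + 1 + 1 + 1 := by omega
      simp [Function.comp, h1]

lemma pvPyRange_two (m : Nat) :
    PySem.List.pyRange 0 (2 * (m : Int)) 2 = (List.range m).map (fun k : Nat => (2 * (k : Int) : Int)) := by
  rw [PySem.List.pyRange_of_pos _ _ (by norm_num)]
  have hcnt : (if (0 : Int) < 2 * (m : Int) then ((2 * (m : Int) - 0 + 2 - 1) / 2).toNat else 0) = m := by
    split_ifs with h <;> omega
  rw [hcnt]
  exact List.map_congr_left (fun k _ => by omega)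

theorem recreate_8bits_spec_aux (signal : List String) (h : signal.length % 2 = 0) :
    recreate_8bits signal = recreate_8bits_alt signal := by
  simp only [recreate_8bits, recreate_8bits_alt]
  rw [PySem.List.foldl_append_singleton_eq_map (fun new_symbol => PySem.Str.slice new_symbol (some 0) (some 4)) signal []]
  set ys : List String := signal.map (fun new_symbol => PySem.Str.slice new_symbol (some 0) (some 4)) with hys
  have hyslen : ys.length = signal.length := by simp [hys]
  have hysmod : ys.length % 2 = 0 := by rw [hyslen]; exact h
  have hlen2 : (PySem.List.len ys : Int) = 2 * ((ys.length / 2 : Nat) : Int) := by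
    simp only [PySem.List.len_eq]; omega
  rw [List.nil_append, hlen2, pvPyRange_two,
    PySem.List.foldl_append_singleton_eq_map
      (fun i => PySem.List.pyGetD ys i "" ++ PySem.List.pyGetD ys (i + 1) ""), List.nil_append,
    List.map_map]
  have hmap : ((fun i => PySem.List.pyGetD ys i "" ++ PySem.List.pyGetD ys (i + 1) "") ∘ fun k : Nat => (2 * (k : Int)))
      = fun k : Nat => ys.getD (2 * k) "" ++ ys.getD (2 * k + 1) "" := by
    funext k
    have e1 : (2 * (k : Int)) = ((2 * k : Nat) : Int) := by push_cast; ring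
    have e2 : ((2 * k : Nat) : Int) + 1 = ((2 * k + 1 : Nat) : Int) := by push_cast; ring
    simp only [Function.comp, e1, e2, PySem.List.pyGetD_natCast]
  rw [hmap, pvRange_map_eq_pairsCat ys hysmod, pvPairBytes_eq_pairsCat_map]
  rfl

-- ===== VERDICT (by name: the statement is the Claim_ definition above) =====
theorem recreate_8bits_spec : Claim_equal_recreate_8bits := by
  intro signal _ hpre
  show recreate_8bits signal = recreate_8bits_alt signal
  exact recreate_8bits_spec_aux signal hpre
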